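-- pv_equiv track=rewrite | github.com/juanferrub/pmagent | src/grounding.py | generate_limitation_response
-- ===== SOURCE A (Python) =====
-- from typing import Any, Dict, List, Optional, Set, Tuple
--
-- def generate_limitation_response(
--
--     original_query: str,
--     attempted_tools: List[str],
--     errors: List[str],
-- ) -> str:
--     """
--     Generate a response when tools fail or are unavailable.
--
--     Args:
--         original_query: What the user asked
--         attempted_tools: Tools that were tried
--         errors: Error messages from tools
--
--     Returns:
--         A helpful limitation response
--     """
--     response = "I wasn't able to get the information you requested.\n\n"
--
--     response += "**What I attempted:**\n"
--     for tool in attempted_tools: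
--         response += f"- {tool}\n"
--
--     response += "\n**What went wrong:**\n"
--     for error in errors:
--         # Clean up error messages
--         clean_error = error.replace('"', "'")[:200]
--         response += f"- {clean_error}\n"
--
--     response += "\n**What you can do:**\n"
--
--     # Provide specific suggestions based on errors
--     if any("permission" in e.lower() or "not_in_channel" in e.lower() for e in errors):
--         response += "- Ensure the bot has been invited to the relevant channels\n"
--         response += "- Check that API tokens have the required scopes\n"
--
--     if any("not found" in e.lower() or "404" in e.lower() for e in errors):
--         response += "- Verify the project key, repository name, or channel name is correct\n"
--
--     if any("timeout" in e.lower() or "connection" in e.lower() for e in errors):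
--         response += "- Try again in a few minutes (service may be temporarily unavailable)\n"
--
--     response += "- Provide more specific identifiers (e.g., exact project key, channel ID)\n"
--
--     return response
-- ===== SOURCE B (Python) =====
-- def generate_limitation_response(original_query, attempted_tools, errors):
--     # Declarative, table-driven rewrite: the document is a list of sections
--     # (header + body lines) rendered by a generic "\n".join; the conditional
--     # advice comes from a keyword->lines rules table filtered against the
--     # lowercased errors, instead of inline if-blocks and += concatenation.
--     rules = [
--         (("permission", "not_in_channel"),
--          ("- Ensure the bot has been invited to the relevant channels\n",
--           "- Check that API tokens have the required scopes\n")),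
--         (("not found", "404"),
--          ("- Verify the project key, repository name, or channel name is correct\n",)),
--         (("timeout", "connection"),
--          ("- Try again in a few minutes (service may be temporarily unavailable)\n",)),
--     ]
--     lows = [e.lower() for e in errors]
--     tips = [line
--             for keywords, lines in rules
--             if any(k in low for low in lows for k in keywords)
--             for line in lines]
--     sections = [
--         ("I wasn't able to get the information you requested.\n", []),
--         ("**What I attempted:**\n",
--          ["- %s\n" % t for t in attempted_tools]),
--         ("**What went wrong:**\n",
--          ["- %s\n" % e.replace('"', "'")[:200] for e in errors]),
--         ("**What you can do:**\n",
--          tips + ["- Provide more specific identifiers (e.g., exact project key, channel ID)\n"]),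
--     ]
--     return "\n".join(header + "".join(body) for header, body in sections)
-- ===== Notes on version B (the rewrite author's own statement) =====
-- stated objective: alternative
-- what changed: B is declarative/table-driven: the conditional advice is produced by filtering a keyword->lines rules table against the once-lowercased errors instead of three inline any-scans with if-blocks, and the whole document is a list of (header, body-lines) sections rendered by a single '\n'.join instead of sequential += concatenation.
import Mathlib
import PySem

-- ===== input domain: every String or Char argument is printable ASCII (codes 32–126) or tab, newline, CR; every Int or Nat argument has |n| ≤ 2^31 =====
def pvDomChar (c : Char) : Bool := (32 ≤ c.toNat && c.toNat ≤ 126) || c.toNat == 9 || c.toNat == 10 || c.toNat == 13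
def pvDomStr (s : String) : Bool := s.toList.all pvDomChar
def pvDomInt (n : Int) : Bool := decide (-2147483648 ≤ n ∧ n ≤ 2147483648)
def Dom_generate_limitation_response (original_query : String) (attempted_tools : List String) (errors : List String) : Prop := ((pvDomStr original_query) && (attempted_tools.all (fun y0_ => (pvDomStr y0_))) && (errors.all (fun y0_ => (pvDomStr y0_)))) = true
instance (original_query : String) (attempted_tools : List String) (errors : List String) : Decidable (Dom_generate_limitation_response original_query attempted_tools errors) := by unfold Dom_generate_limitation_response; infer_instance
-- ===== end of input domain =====

-- B is a declarative, table-driven rewrite: the conditional advice comes from a keyword->lines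
-- rules table filtered against the lowercased errors, and the document is a list of sections
-- rendered by one "\n".join (alternative decomposition; same cost).

-- ===== PORT A =====
def generate_limitation_response (original_query : String) (attempted_tools : List String) (errors : List String) : String :=
  let response := "I wasn't able to get the information you requested.\n\n"
  let response := response ++ "**What I attempted:**\n"
  let response := attempted_tools.foldl (fun r tool => r ++ "- " ++ tool ++ "\n") response
  let response := response ++ "\n**What went wrong:**\n"
  let response := errors.foldl (fun r error =>
    let clean_error := PySem.Str.slice (PySem.Str.replace error "\"" "'") none (some 200)
    r ++ "- " ++ clean_error ++ "\n") response
  let response := response ++ "\n**What you can do:**\n"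
  let response :=
    if errors.any (fun e => PySem.Str.isIn "permission" (PySem.Str.lower e) || PySem.Str.isIn "not_in_channel" (PySem.Str.lower e)) then
      response ++ "- Ensure the bot has been invited to the relevant channels\n"
               ++ "- Check that API tokens have the required scopes\n"
    else response
  let response :=
    if errors.any (fun e => PySem.Str.isIn "not found" (PySem.Str.lower e) || PySem.Str.isIn "404" (PySem.Str.lower e)) then
      response ++ "- Verify the project key, repository name, or channel name is correct\n"
    else response
  let response :=
    if errors.any (fun e => PySem.Str.isIn "timeout" (PySem.Str.lower e) || PySem.Str.isIn "connection" (PySem.Str.lower e)) then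
      response ++ "- Try again in a few minutes (service may be temporarily unavailable)\n"
    else response
  response ++ "- Provide more specific identifiers (e.g., exact project key, channel ID)\n"

-- ===== PORT B =====
def generate_limitation_response_alt (original_query : String) (attempted_tools : List String) (errors : List String) : String :=
  let rules : List (List String × List String) :=
    [(["permission", "not_in_channel"],
      ["- Ensure the bot has been invited to the relevant channels\n",
       "- Check that API tokens have the required scopes\n"]),
     (["not found", "404"],
      ["- Verify the project key, repository name, or channel name is correct\n"]),
     (["timeout", "connection"],
      ["- Try again in a few minutes (service may be temporarily unavailable)\n"])]
  let lows := errors.map PySem.Str.lower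
  let tips := (rules.filter (fun r => lows.any (fun low => r.1.any (fun k => PySem.Str.isIn k low)))).flatMap (fun r => r.2)
  let sections : List (String × List String) :=
    [("I wasn't able to get the information you requested.\n", []),
     ("**What I attempted:**\n", attempted_tools.map (fun t => "- " ++ t ++ "\n")),
     ("**What went wrong:**\n", errors.map (fun e => "- " ++ PySem.Str.slice (PySem.Str.replace e "\"" "'") none (some 200) ++ "\n")),
     ("**What you can do:**\n", tips ++ ["- Provide more specific identifiers (e.g., exact project key, channel ID)\n"])]
  PySem.Str.join "\n" (sections.map (fun s => s.1 ++ PySem.Str.join "" s.2))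

-- ===== PRECONDITION & SPEC =====
def Spec_generate_limitation_response (original_query : String) (attempted_tools : List String) (errors : List String) (out : String) : Prop := out = generate_limitation_response_alt original_query attempted_tools errors
instance (original_query : String) (attempted_tools : List String) (errors : List String) (out : String) : Decidable (Spec_generate_limitation_response original_query attempted_tools errors out) := by unfold Spec_generate_limitation_response; infer_instance

-- ===== CLAIM (what is proved, stated in full; the proofs are below) =====
def Claim_equal_generate_limitation_response : Prop := ∀ (original_query : String) (attempted_tools : List String) (errors : List String), Dom_generate_limitation_response original_query attempted_tools errors → Spec_generate_limitation_response original_query attempted_tools errors (generate_limitation_response original_query attempted_tools errors)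

-- ===== LEMMAS AND PROOFS =====

-- flattening after interspersing the empty separator changes nothing
theorem flatten_intersperse_nil {α : Type} (l : List (List α)) :
    (List.intersperse ([] : List α) l).flatten = l.flatten := by
  induction l with
  | nil => rfl
  | cons h t ih =>
    cases t with
    | nil => simp
    | cons h2 t2 => simp_all [List.intersperse]

-- A's tools loop, seen on the character-list side
theorem a_tools_toList (tools : List String) (init : String) :
    (tools.foldl (fun r tool => r ++ "- " ++ tool ++ "\n") init).toList
      = init.toList ++ (tools.map (fun tool => ("- " ++ tool ++ "\n").toList)).flatten := by
  induction tools generalizing init with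
  | nil => simp
  | cons h t ih => simp [ih, List.append_assoc]

-- A's errors loop, seen on the character-list side
theorem a_errors_toList (errors : List String) (init : String) :
    (errors.foldl (fun r error =>
        r ++ "- " ++ PySem.Str.slice (PySem.Str.replace error "\"" "'") none (some 200) ++ "\n") init).toList
      = init.toList ++ (errors.map (fun error =>
          ("- " ++ PySem.Str.slice (PySem.Str.replace error "\"" "'") none (some 200) ++ "\n").toList)).flatten := by
  induction errors generalizing init with
  | nil => simp
  | cons h t ih => simp [ih, List.append_assoc]

-- ===== VERDICT (by name: the statement is the Claim_ definition above) =====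
set_option maxRecDepth 8192 in
set_option maxHeartbeats 2000000 in
theorem generate_limitation_response_spec : Claim_equal_generate_limitation_response := by
  intro q tools errors _
  unfold Spec_generate_limitation_response
  show generate_limitation_response _ _ _ = _
  simp only [generate_limitation_response, generate_limitation_response_alt]
  simp only [List.filter_cons, List.filter_nil, Function.comp_def, List.any_map, Function.comp_def, List.any_cons, List.any_nil, Bool.or_false]
  apply String.toList_inj.mp
  split_ifs <;>
    simp [a_tools_toList, a_errors_toList, PySem.Str.toList_join, PySem.Chars.join, List.intercalate, flatten_intersperse_nil, List.append_assoc,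
          List.map_map, Function.comp_def]
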